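-- pv_equiv track=rewrite | github.com/MoyosoreCodes/job-search | job_search.py | is_sponsor_friendly_location
-- ===== SOURCE A (Python) =====
-- SPONSOR_FRIENDLY_LOCATIONS = [
--     "united states", "usa", "canada", "germany", "netherlands", "ireland",
--     "australia", "new zealand", "uk", "united kingdom", "sweden", "denmark",
--     "switzerland", "austria", "singapore"
-- ]
--
-- def is_sponsor_friendly_location(location):
--     """Check if location is in a visa sponsor-friendly country."""
--     if not location:
--         return False
--
--     location_lower = location.lower()
--     for country in SPONSOR_FRIENDLY_LOCATIONS:
--         if country in location_lower:
--             return True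
--     return False
-- ===== SOURCE B (Python) =====
-- SPONSOR_FRIENDLY_LOCATIONS = [
--     "united states", "usa", "canada", "germany", "netherlands", "ireland",
--     "australia", "new zealand", "uk", "united kingdom", "sweden", "denmark",
--     "switzerland", "austria", "singapore"
-- ]
--
-- def is_sponsor_friendly_location(location):
--     """Check if location is in a visa sponsor-friendly country."""
--     if not location:
--         return False
--     location_lower = location.lower()
--     # position-major scan: at each position, try to match any country name there
--     return any(
--         location_lower.startswith(country, i)
--         for i in range(len(location_lower))
--         for country in SPONSOR_FRIENDLY_LOCATIONS
--     )
-- ===== Notes on version B (the rewrite author's own statement) =====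
-- stated objective: alternative
-- what changed: Replaces the country-major loop of 15 independent substring scans with a single position-major scan of the lowered location that tries to match each country name as a prefix at every position.
import Mathlib
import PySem

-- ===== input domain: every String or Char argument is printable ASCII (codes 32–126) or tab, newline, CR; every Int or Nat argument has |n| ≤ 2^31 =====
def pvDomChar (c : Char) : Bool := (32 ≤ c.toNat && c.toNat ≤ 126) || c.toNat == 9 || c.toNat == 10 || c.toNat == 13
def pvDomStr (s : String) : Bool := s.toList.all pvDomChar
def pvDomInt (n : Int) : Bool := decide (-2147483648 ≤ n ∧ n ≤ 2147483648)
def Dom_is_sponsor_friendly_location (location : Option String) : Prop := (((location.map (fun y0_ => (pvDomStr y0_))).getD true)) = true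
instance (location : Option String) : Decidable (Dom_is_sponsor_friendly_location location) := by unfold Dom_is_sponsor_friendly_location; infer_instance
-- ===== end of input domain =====

-- B replaces the country-major loop (15 separate substring scans) with a single
-- position-major scan matching each country name as a prefix at every position; alternative, same cost.


-- ===== PORT A =====
def pvCountries : List String :=
  ["united states", "usa", "canada", "germany", "netherlands", "ireland",
   "australia", "new zealand", "uk", "united kingdom", "sweden", "denmark",
   "switzerland", "austria", "singapore"]

-- the 'for country in …: if country in location_lower: return True' loop
def pvLoopA (cs : List String) (s : String) : Bool :=
  match cs with
  | [] => false
  | c :: rest => if PySem.Str.isIn c s then true else pvLoopA rest s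

def is_sponsor_friendly_location (location : Option String) : Bool :=
  match location with
  | none => false                                -- 'if not location: return False'
  | some loc =>
    if loc = "" then false                       -- '' is falsy too
    else pvLoopA pvCountries (PySem.Str.lower loc)

-- ===== PORT B =====
-- any(location_lower.startswith(country, i) for i in range(len) for country in …);
-- 's.startswith(c, i)' with 0 ≤ i < len s is exactly a prefix test on s.toList.drop i (exact on this range)
def is_sponsor_friendly_location_alt (location : Option String) : Bool :=
  match location with
  | none => false
  | some loc =>
    if loc = "" then false
    else
      let cs := (PySem.Str.lower loc).toList
      (PySem.List.pyRange 0 (cs.length : Int) 1).any (fun i =>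
        pvCountries.any (fun c => PySem.Chars.startswith (cs.drop i.toNat) c.toList))

-- ===== PRECONDITION & SPEC =====
def Spec_is_sponsor_friendly_location (location : Option String) (out : Bool) : Prop := out = is_sponsor_friendly_location_alt location
instance (location : Option String) (out : Bool) : Decidable (Spec_is_sponsor_friendly_location location out) := by unfold Spec_is_sponsor_friendly_location; infer_instance

-- ===== CLAIM (what is proved, stated in full; the proofs are below) =====
def Claim_equal_is_sponsor_friendly_location : Prop := ∀ (location : Option String), Dom_is_sponsor_friendly_location location → Spec_is_sponsor_friendly_location location (is_sponsor_friendly_location location)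

-- ===== LEMMAS AND PROOFS =====

lemma pvLoopA_eq_any (cs : List String) (s : String) :
    pvLoopA cs s = cs.any (fun c => PySem.Str.isIn c s) := by
  induction cs with
  | nil => rfl
  | cons c rest ih => cases hc : PySem.Str.isIn c s <;> simp [pvLoopA, ih]

lemma pvCountries_ne_nil : ∀ c ∈ pvCountries, c.toList ≠ [] := by decide

lemma pv_main (s : String) :
    pvLoopA pvCountries s =
      (PySem.List.pyRange 0 (s.toList.length : Int) 1).any (fun i =>
        pvCountries.any (fun c => PySem.Chars.startswith (s.toList.drop i.toNat) c.toList)) := by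
  rw [pvLoopA_eq_any]
  rcases Bool.eq_false_or_eq_true ((PySem.List.pyRange 0 (s.toList.length : Int) 1).any (fun i =>
        pvCountries.any (fun c => PySem.Chars.startswith (s.toList.drop i.toNat) c.toList))) with h | h
  swap
  · rw [h]
    rw [List.any_eq_false] at h ⊢
    intro c hc
    rw [Bool.not_eq_true]
    rw [PySem.Str.isIn_eq]
    rw [Bool.eq_false_iff]
    intro hin
    obtain ⟨j, hj⟩ := (PySem.Chars.exists_prefix_drop_iff_isIn c.toList s.toList).2 hin
    have hjlt : j < s.toList.length := by
      by_contra hge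
      push Not at hge
      rw [List.drop_eq_nil_of_le hge] at hj
      exact pvCountries_ne_nil c hc (List.prefix_nil.mp hj)
    have := h (j : Int) (by
      rw [PySem.List.mem_pyRange_one]
      constructor <;> omega)
    rw [Bool.not_eq_true, List.any_eq_false] at this
    have := this c hc
    rw [Bool.not_eq_true, Bool.eq_false_iff] at this
    exact this (by
      rw [PySem.Chars.startswith_iff]
      simpa using hj)
  · rw [h]
    rw [List.any_eq_true] at h ⊢
    obtain ⟨i, hi, hany⟩ := h
    rw [List.any_eq_true] at hany
    obtain ⟨c, hc, hpre⟩ := hany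
    refine ⟨c, hc, ?_⟩
    rw [PySem.Str.isIn_eq, ← PySem.Chars.exists_prefix_drop_iff_isIn]
    exact ⟨i.toNat, (PySem.Chars.startswith_iff _ _).mp hpre⟩

-- ===== VERDICT (by name: the statement is the Claim_ definition above) =====
theorem is_sponsor_friendly_location_spec : Claim_equal_is_sponsor_friendly_location := by
  intro location _
  unfold Spec_is_sponsor_friendly_location is_sponsor_friendly_location is_sponsor_friendly_location_alt
  match location with
  | none => rfl
  | some loc =>
    by_cases h : loc = ""
    · simp [h]
    · simp only [h, if_false]
      exact pv_main (PySem.Str.lower loc)
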